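-- pv_equiv track=rewrite | github.com/MaxOvcharov/checkio_mission_solutions | home_missions/long_repeat.py | long_repeat_my
-- ===== SOURCE A (Python) =====
-- def long_repeat_my(line):
--     """
--         length the longest substring that consists of the same char
--     """
--     previous, current, tmp_set = 0, 0, set()
--     for char in line:
--         if char in tmp_set:
--             current += 1
--         elif len(tmp_set) == 0:
--             tmp_set.add(char)
--             current = 1
--         else:
--             tmp_set.clear()
--             previous = previous if previous > current else current
--             current = 1
--             tmp_set.add(char)
--
--     return previous if previous > current else current
-- ===== SOURCE B (Python) =====
-- def long_repeat_my(line):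
--     best = 0
--     i = 0
--     n = len(line)
--     while i < n:
--         j = i + 1
--         while j < n and line[j] == line[i]:
--             j += 1
--         if j - i > best:
--             best = j - i
--         i = j
--     return best
-- ===== Notes on version B (the rewrite author's own statement) =====
-- stated objective: alternative
-- what changed: Replaced A's per-character state machine (previous/current counters plus a one-element set used to detect run boundaries) by a two-pointer scan that jumps run by run and takes the maximum run length directly.
import Mathlib
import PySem

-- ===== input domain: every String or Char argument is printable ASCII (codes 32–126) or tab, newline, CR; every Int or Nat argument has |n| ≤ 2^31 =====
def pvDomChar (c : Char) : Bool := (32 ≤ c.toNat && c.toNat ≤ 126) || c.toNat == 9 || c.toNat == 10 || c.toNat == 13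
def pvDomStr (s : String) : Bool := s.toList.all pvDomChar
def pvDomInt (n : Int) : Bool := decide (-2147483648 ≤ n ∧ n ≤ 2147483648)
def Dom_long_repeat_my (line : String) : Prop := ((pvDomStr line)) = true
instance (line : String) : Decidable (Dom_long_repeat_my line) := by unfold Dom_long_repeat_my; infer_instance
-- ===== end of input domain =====

-- B replaces A's previous/current/one-element-set state machine by a two-pointer run-by-run scan (alternative decomposition, same cost).

-- ===== PORT A =====
-- one loop step of A: state = (previous, current, tmp_set)
def pvAStep (st : Int × Int × PySem.Set Char) (char : Char) : Int × Int × PySem.Set Char :=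
  match st with
  | (previous, current, tmp_set) =>
    if PySem.Set.contains tmp_set char then
      (previous, current + 1, tmp_set)
    else if PySem.Set.len tmp_set = 0 then
      (previous, 1, PySem.Set.add tmp_set char)
    else
      ((if previous > current then previous else current), 1,
       PySem.Set.add PySem.Set.empty char)  -- tmp_set.clear(); tmp_set.add(char)

-- the final 'return previous if previous > current else current'
def pvAFinish (st : Int × Int × PySem.Set Char) : Int :=
  match st with
  | (previous, current, _) => if previous > current then previous else current

def long_repeat_my (line : String) : Int :=
  pvAFinish (line.toList.foldl pvAStep (0, 0, PySem.Set.empty))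

-- ===== PORT B =====
-- Source B's outer while loop; the inner while (advance j over equal chars) is the takeWhile span
def pvBLoop : List Char → Int → Int
  | [], best => best
  | c :: t, best =>
    let k : Int := 1 + (t.takeWhile (· == c)).length
    pvBLoop (t.drop (t.takeWhile (· == c)).length) (if k > best then k else best)
termination_by l _ => l.length
decreasing_by
  simp only [List.length_drop, List.length_cons]
  omega

def long_repeat_my_alt (line : String) : Int := pvBLoop line.toList 0

-- ===== PRECONDITION & SPEC =====
def Spec_long_repeat_my (line : String) (out : Int) : Prop := out = long_repeat_my_alt line
instance (line : String) (out : Int) : Decidable (Spec_long_repeat_my line out) := by unfold Spec_long_repeat_my; infer_instance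

-- ===== CLAIM (what is proved, stated in full; the proofs are below) =====
def Claim_equal_long_repeat_my : Prop := ∀ (line : String), Dom_long_repeat_my line → Spec_long_repeat_my line (long_repeat_my line)

-- ===== LEMMAS AND PROOFS =====

-- abstract form of A's loop once the set holds exactly one char
def pvFRun : List Char → Int → Int → Char → Int
  | [], prev, cur, _ => if prev > cur then prev else cur
  | x :: t, prev, cur, c =>
    if x == c then pvFRun t prev (cur + 1) c
    else pvFRun t (if prev > cur then prev else cur) 1 x

theorem pv_if_gt_eq_max (a b : Int) : (if a > b then a else b) = max a b := by
  split_ifs with h <;> omega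

theorem pv_drop_takeWhile (p : Char → Bool) (t : List Char) :
    t.drop (t.takeWhile p).length = t.dropWhile p := by
  induction t with
  | nil => rfl
  | cons x t ih =>
    by_cases h : p x
    · simp [h, ih]
    · simp [h]

-- A's fold from a singleton set computes pvFRun
theorem pv_fold_singleton (l : List Char) : ∀ (prev cur : Int) (c : Char),
    pvAFinish (l.foldl pvAStep (prev, cur, [c])) = pvFRun l prev cur c := by
  induction l with
  | nil => intro prev cur c; rfl
  | cons x t ih =>
    intro prev cur c
    by_cases h : x = c
    · subst h
      have : pvAStep (prev, cur, [x]) x = (prev, cur + 1, [x]) := by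
        simp [pvAStep, PySem.Set.contains]
      simp only [List.foldl_cons, this, pvFRun, BEq.rfl, if_true]
      exact ih prev (cur + 1) x
    · have hc : (PySem.Set.contains [c] x) = false := by
        simp [PySem.Set.contains, h]
      have : pvAStep (prev, cur, [c]) x
          = ((if prev > cur then prev else cur), 1, [x]) := by
        simp [pvAStep, PySem.Set.len, PySem.Set.add, PySem.Set.empty,
              PySem.Set.contains, h]
      simp only [List.foldl_cons, this, pvFRun, beq_iff_eq, h, if_false]
      exact ih (if prev > cur then prev else cur) 1 x

-- pvFRun is B's loop started after the current run is absorbed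
theorem pv_fRun_eq (l : List Char) : ∀ (prev cur : Int) (c : Char),
    pvFRun l prev cur c
      = pvBLoop (l.dropWhile (· == c))
          (max prev (cur + (l.takeWhile (· == c)).length)) := by
  induction l with
  | nil =>
    intro prev cur c
    simp [pvFRun, pvBLoop, pv_if_gt_eq_max]
  | cons x t ih =>
    intro prev cur c
    by_cases h : x = c
    · subst h
      simp only [pvFRun, BEq.rfl, if_true, List.dropWhile_cons, List.takeWhile_cons]
      rw [ih prev (cur + 1) x]
      have harg : cur + 1 + ((t.takeWhile (· == x)).length : Int)
          = cur + ((x :: t.takeWhile (· == x)).length : Int) := by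
        simp only [List.length_cons]
        push_cast
        ring
      rw [harg]
    · have hb : (x == c) = false := by simp [h]
      simp only [pvFRun, hb, if_false, List.dropWhile_cons, List.takeWhile_cons,
                 Bool.false_eq_true, List.length_nil]
      rw [ih (if prev > cur then prev else cur) 1 x, pvBLoop]
      simp only [pv_drop_takeWhile, pv_if_gt_eq_max]
      congr 1
      push_cast
      omega

-- ===== VERDICT (by name: the statement is the Claim_ definition above) =====
theorem long_repeat_my_spec : Claim_equal_long_repeat_my := by
  intro line _
  unfold Spec_long_repeat_my long_repeat_my long_repeat_my_alt
  cases hl : line.toList with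
  | nil => simp [pvAFinish, pvBLoop]
  | cons x t =>
    have h1 : pvAStep (0, 0, PySem.Set.empty) x = (0, 1, [x]) := by
      simp [pvAStep, PySem.Set.contains, PySem.Set.len, PySem.Set.empty, PySem.Set.add]
    simp only [List.foldl_cons, h1]
    rw [pv_fold_singleton, pv_fRun_eq, pvBLoop]
    simp only [pv_drop_takeWhile, pv_if_gt_eq_max]
    congr 1
    omega
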